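-- pv_equiv track=rewrite | github.com/GaiaKoren/ARMY | Euler/p44.py | hexagonal_numbers
-- ===== SOURCE A (Python) =====
-- def hexagonal_numbers(lim):
--     nums = []
--     n = 1
--     curr = 0
--     while curr < lim:
--         curr = n*(2*n-1)
--         nums.append(curr)
--         n += 1
--     return nums
-- ===== SOURCE B (Python) =====
-- def hexagonal_numbers(lim):
--     if lim <= 0:
--         return []
--     n = 1
--     while n * (2 * n - 1) < lim:
--         n += 1
--     return [k * (2 * k - 1) for k in range(1, n + 1)]
-- ===== Notes on version B (the rewrite author's own statement) =====
-- stated objective: alternative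
-- what changed: B splits the job into two stages: an index-only search for the count N (the smallest n with n*(2n-1) >= lim), then a range comprehension producing the terms, with an early [] for lim <= 0 -- instead of A's single while loop threading an accumulator list and a previous-value variable.
import Mathlib
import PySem

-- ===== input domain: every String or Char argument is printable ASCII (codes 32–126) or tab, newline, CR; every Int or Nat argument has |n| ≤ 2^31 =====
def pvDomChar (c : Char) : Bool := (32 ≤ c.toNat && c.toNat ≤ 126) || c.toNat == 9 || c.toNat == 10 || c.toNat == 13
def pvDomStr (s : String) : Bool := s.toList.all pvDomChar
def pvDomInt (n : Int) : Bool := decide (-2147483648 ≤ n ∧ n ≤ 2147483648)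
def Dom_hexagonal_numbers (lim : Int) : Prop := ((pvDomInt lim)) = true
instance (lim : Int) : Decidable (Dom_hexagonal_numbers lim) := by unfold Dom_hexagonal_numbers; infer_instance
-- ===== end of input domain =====

-- B finds the term count first with an index-only loop, then builds the list as a range
-- comprehension, with an early [] for lim ≤ 0 — instead of A's single while loop threading
-- an accumulator list and a previous value (alternative decomposition, no speed claim).


-- ===== PORT A =====
-- the while loop of A; fuel only makes the recursion total (lim.toNat+1 iterations always
-- suffice, since after the k-th iteration curr = k*(2k-1) ≥ k)
def hexLoopA (lim : Int) (fuel : Nat) (nums : List Int) (n curr : Int) : List Int :=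
  match fuel with
  | 0 => nums
  | Nat.succ fuel' =>
    if curr < lim then
      hexLoopA lim fuel' (nums ++ [n * (2 * n - 1)]) (n + 1) (n * (2 * n - 1))
    else nums

def hexagonal_numbers (lim : Int) : List Int :=
  hexLoopA lim (lim.toNat + 1) [] 1 0

-- ===== PORT B =====
-- B's count-search loop (while n*(2n-1) < lim: n += 1); fuel only makes the recursion total
-- (lim.toNat+1 steps from n = 1 always suffice, since n*(2n-1) ≥ n for n ≥ 1)
def hexCount (lim : Int) (fuel : Nat) (n : Int) : Int :=
  match fuel with
  | 0 => n
  | Nat.succ fuel' =>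
    if n * (2 * n - 1) < lim then hexCount lim fuel' (n + 1) else n

def hexagonal_numbers_alt (lim : Int) : List Int :=
  if lim ≤ 0 then []
  else (PySem.List.pyRange 1 (hexCount lim (lim.toNat + 1) 1 + 1) 1).map (fun k => k * (2 * k - 1))

-- ===== PRECONDITION & SPEC =====
def Spec_hexagonal_numbers (lim : Int) (out : List Int) : Prop := out = hexagonal_numbers_alt lim
instance (lim : Int) (out : List Int) : Decidable (Spec_hexagonal_numbers lim out) := by unfold Spec_hexagonal_numbers; infer_instance

-- ===== CLAIM (what is proved, stated in full; the proofs are below) =====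
def Claim_equal_hexagonal_numbers : Prop := ∀ (lim : Int), Dom_hexagonal_numbers lim → Spec_hexagonal_numbers lim (hexagonal_numbers lim)

-- ===== LEMMAS AND PROOFS =====

theorem hexLoopA_succ (lim : Int) (fuel : Nat) (nums : List Int) (n curr : Int) :
    hexLoopA lim (fuel + 1) nums n curr =
      if curr < lim then hexLoopA lim fuel (nums ++ [n * (2 * n - 1)]) (n + 1) (n * (2 * n - 1))
      else nums := rfl

theorem hexCount_succ (lim : Int) (fuel : Nat) (n : Int) :
    hexCount lim (fuel + 1) n =
      if n * (2 * n - 1) < lim then hexCount lim fuel (n + 1) else n := rfl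

-- the count-search result never moves below its start
theorem hexCount_ge (lim : Int) : ∀ (fuel : Nat) (n : Int), n ≤ hexCount lim fuel n := by
  intro fuel
  induction fuel with
  | zero => intro n; simp [hexCount]
  | succ fuel' ih =>
    intro n
    rw [hexCount_succ]
    split
    · have := ih (n + 1); omega
    · omega

-- Invariant: with the guard true, enough fuel and the indices aligned, A's accumulating loop
-- from index n equals nums ++ the comprehension over [n, hexCount … n].
theorem hexLoopA_eq_range (lim : Int) :
    ∀ (fuel : Nat) (nums : List Int) (n curr : Int), curr < lim → 1 ≤ n → lim ≤ n + fuel →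
      hexLoopA lim (fuel + 1) nums n curr =
        nums ++ (PySem.List.pyRange n (hexCount lim (fuel + 1) n + 1) 1).map
          (fun k => k * (2 * k - 1)) := by
  intro fuel
  induction fuel with
  | zero =>
    intro nums n curr h hn hf
    have hge : ¬ n * (2 * n - 1) < lim := by
      push_cast at hf
      nlinarith [mul_nonneg (show (0:Int) ≤ n by omega) (show (0:Int) ≤ n - 1 by omega)]
    rw [hexLoopA_succ, if_pos h, hexCount_succ, if_neg hge]
    rw [PySem.List.pyRange_one_cons (by omega)]
    simp [hexLoopA, PySem.List.pyRange]
  | succ fuel' ih =>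
    intro nums n curr h hn hf
    rw [hexLoopA_succ, if_pos h, hexCount_succ]
    by_cases hlt : n * (2 * n - 1) < lim
    · rw [if_pos hlt, ih (nums ++ [n * (2 * n - 1)]) (n + 1) _ hlt (by omega) (by omega)]
      have hge : n + 1 ≤ hexCount lim (fuel' + 1) (n + 1) := hexCount_ge lim _ _
      rw [PySem.List.pyRange_one_cons (show n < hexCount lim (fuel' + 1) (n + 1) + 1 by omega)]
      simp
    · have hnl : ¬ n * (2 * n - 1) < lim := hlt
      rw [if_neg hnl, hexLoopA_succ, if_neg (by omega)]
      rw [PySem.List.pyRange_one_cons (by omega)]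
      simp [PySem.List.pyRange]

-- ===== VERDICT (by name: the statement is the Claim_ definition above) =====
theorem hexagonal_numbers_spec : Claim_equal_hexagonal_numbers := by
  intro lim _
  unfold Spec_hexagonal_numbers hexagonal_numbers hexagonal_numbers_alt
  by_cases hle : lim ≤ 0
  · have : ¬ (0 : Int) < lim := by omega
    simp [hexLoopA, if_pos hle, this]
  · rw [if_neg hle]
    exact hexLoopA_eq_range lim lim.toNat [] 1 0 (by omega) le_rfl (by omega)
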